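-- pv_equiv track=rewrite | github.com/sumitgaur/leetcode- | codes/mycode/array.py | track_switching
-- ===== SOURCE A (Python) =====
-- from typing import List
--
-- def track_switching(obstacles: List[int]) -> int:
--     all_tracks = [1, 2, 3]
--
--     def do(cur_track, i):
--         if i < len(obstacles):
--             if obstacles[i] == cur_track:
--                 a, b = [i for i in all_tracks if i != cur_track]
--                 return min(do(a, i + 1) + 1, do(b, i + 1) + 1)
--             return do(cur_track, i + 1)
--         return 0
--
--     return do(2, 0)
-- ===== SOURCE B (Python) =====
-- def track_switching(obstacles):
--     # backward DP: c_t = min switches needed from track t onward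
--     c1 = c2 = c3 = 0
--     for o in reversed(obstacles):
--         c1, c2, c3 = (1 + min(c2, c3) if o == 1 else c1,
--                       1 + min(c1, c3) if o == 2 else c2,
--                       1 + min(c1, c2) if o == 3 else c3)
--     return c2
-- ===== Notes on version B (the rewrite author's own statement) =====
-- stated objective: faster
-- what changed: replaced the exponential branching recursion with a single backward dynamic-programming pass keeping the minimal switch count for each of the three tracks
import Mathlib
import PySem

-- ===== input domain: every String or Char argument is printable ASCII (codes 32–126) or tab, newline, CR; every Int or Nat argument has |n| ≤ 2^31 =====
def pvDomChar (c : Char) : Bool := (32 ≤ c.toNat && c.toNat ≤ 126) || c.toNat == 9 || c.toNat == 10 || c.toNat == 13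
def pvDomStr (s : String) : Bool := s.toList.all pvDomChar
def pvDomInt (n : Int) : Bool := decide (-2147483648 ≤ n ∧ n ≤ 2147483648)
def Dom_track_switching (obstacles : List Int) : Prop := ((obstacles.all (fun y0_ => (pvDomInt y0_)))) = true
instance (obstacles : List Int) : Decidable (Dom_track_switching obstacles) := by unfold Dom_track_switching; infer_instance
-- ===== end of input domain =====

-- B replaces A's exponential branching recursion with a single backward DP pass over the list (faster, asymptotic).


-- ===== PORT A =====
-- inner 'do(cur_track, i)': recursion on the index, just as in the Python;
-- the '[t for t in all_tracks if t != cur_track]' comprehension is the filter below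
-- (its two elements are unpacked by the match; the '_' arm is unreachable since cur ∈ {1,2,3}).
def trackDo (obstacles : List Int) (cur : Int) (i : Nat) : Int :=
  if h : i < obstacles.length then
    if obstacles[i] = cur then
      match ([1, 2, 3] : List Int).filter (fun t => t != cur) with
      | [a, b] => min (trackDo obstacles a (i + 1) + 1) (trackDo obstacles b (i + 1) + 1)
      | _ => 0
    else trackDo obstacles cur (i + 1)
  else 0
termination_by obstacles.length - i

def track_switching (obstacles : List Int) : Int :=
  trackDo obstacles 2 0

-- ===== PORT B =====
-- one fold over reversed(obstacles), state = (c1, c2, c3): min switches from each track onward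
def trackStep (c : Int × Int × Int) (o : Int) : Int × Int × Int :=
  (if o = 1 then 1 + min c.2.1 c.2.2 else c.1,
   if o = 2 then 1 + min c.1 c.2.2 else c.2.1,
   if o = 3 then 1 + min c.1 c.2.1 else c.2.2)

def track_switching_alt (obstacles : List Int) : Int :=
  (obstacles.reverse.foldl trackStep (0, 0, 0)).2.1

-- ===== PRECONDITION & SPEC =====
def Spec_track_switching (obstacles : List Int) (out : Int) : Prop := out = track_switching_alt obstacles
instance (obstacles : List Int) (out : Int) : Decidable (Spec_track_switching obstacles out) := by unfold Spec_track_switching; infer_instance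

-- ===== CLAIM (what is proved, stated in full; the proofs are below) =====
def Claim_equal_track_switching : Prop := ∀ (obstacles : List Int), Dom_track_switching obstacles → Spec_track_switching obstacles (track_switching obstacles)

-- ===== LEMMAS AND PROOFS =====

-- the three recursion values at index i are exactly the foldr of trackStep's flip over the suffix
theorem trackDo_eq_foldr (obstacles : List Int) :
    ∀ (n i : Nat), obstacles.length - i = n →
      (trackDo obstacles 1 i, trackDo obstacles 2 i, trackDo obstacles 3 i)
        = (obstacles.drop i).foldr (fun o c => trackStep c o) (0, 0, 0) := by
  intro n
  induction n with
  | zero =>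
    intro i hi
    have hle : obstacles.length ≤ i := by omega
    rw [List.drop_eq_nil_of_le hle]
    unfold trackDo
    rw [dif_neg (by omega), dif_neg (by omega), dif_neg (by omega)]
    rfl
  | succ m ih =>
    intro i hi
    have h : i < obstacles.length := by omega
    have hdrop : obstacles.drop i = obstacles[i] :: obstacles.drop (i + 1) :=
      List.drop_eq_getElem_cons h
    have hrec := ih (i + 1) (by omega)
    rw [hdrop, List.foldr_cons, ← hrec]
    conv_lhs => unfold trackDo
    rw [dif_pos h, dif_pos h, dif_pos h]
    by_cases h1 : obstacles[i] = (1 : Int)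
    · rw [if_pos h1, if_neg (by omega), if_neg (by omega)]
      rw [show (([1, 2, 3] : List Int).filter (fun t => t != (1 : Int))) = [2, 3] by decide]
      simp only [trackStep, h1]
      norm_num
      omega
    · by_cases h2 : obstacles[i] = (2 : Int)
      · rw [if_neg (by omega), if_pos h2, if_neg (by omega)]
        rw [show (([1, 2, 3] : List Int).filter (fun t => t != (2 : Int))) = [1, 3] by decide]
        simp only [trackStep, h2]
        norm_num
        omega
      · by_cases h3 : obstacles[i] = (3 : Int)
        · rw [if_neg (by omega), if_neg (by omega), if_pos h3]
          rw [show (([1, 2, 3] : List Int).filter (fun t => t != (3 : Int))) = [1, 2] by decide]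
          simp only [trackStep, h3]
          norm_num
          omega
        · rw [if_neg h1, if_neg h2, if_neg h3]
          simp only [trackStep]
          rw [if_neg h1, if_neg h2, if_neg h3]

-- ===== VERDICT (by name: the statement is the Claim_ definition above) =====
theorem track_switching_spec : Claim_equal_track_switching := by
  intro obstacles _
  show track_switching obstacles = track_switching_alt obstacles
  have h := trackDo_eq_foldr obstacles (obstacles.length - 0) 0 rfl
  rw [List.drop_zero] at h
  unfold track_switching track_switching_alt
  rw [List.foldl_reverse]
  have := congrArg (fun p => p.2.1) h
  simpa using this
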